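-- pv_equiv track=rewrite | github.com/sebastianbreguel/Data-Structures-And-Algorithms | T2/check_hash.py | check_solve
-- ===== SOURCE A (Python) =====
-- def check_solve(test, obtained):
--     map_dict = dict()
--     if len(test) != len(obtained):
--         return False
--     for i in range(len(test)):
--         a = obtained[i]
--         b = test[i]
--         if a in map_dict.keys():
--             if map_dict[a] != b:
--                 return False
--         else:
--             map_dict[a] = b
--     return True
-- ===== SOURCE B (Python) =====
-- def check_solve(test, obtained):
--     if len(test) != len(obtained):
--         return False
--     # a consistent mapping has exactly one distinct (key, value) pair per distinct key
--     return len(set(zip(obtained, test))) == len(set(obtained))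
-- ===== Notes on version B (the rewrite author's own statement) =====
-- stated objective: simpler
-- what changed: Replaced the index loop that builds a dict with early exits by a single set-cardinality comparison: the mapping is consistent iff the number of distinct (obtained, test) pairs equals the number of distinct obtained keys.
import Mathlib
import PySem

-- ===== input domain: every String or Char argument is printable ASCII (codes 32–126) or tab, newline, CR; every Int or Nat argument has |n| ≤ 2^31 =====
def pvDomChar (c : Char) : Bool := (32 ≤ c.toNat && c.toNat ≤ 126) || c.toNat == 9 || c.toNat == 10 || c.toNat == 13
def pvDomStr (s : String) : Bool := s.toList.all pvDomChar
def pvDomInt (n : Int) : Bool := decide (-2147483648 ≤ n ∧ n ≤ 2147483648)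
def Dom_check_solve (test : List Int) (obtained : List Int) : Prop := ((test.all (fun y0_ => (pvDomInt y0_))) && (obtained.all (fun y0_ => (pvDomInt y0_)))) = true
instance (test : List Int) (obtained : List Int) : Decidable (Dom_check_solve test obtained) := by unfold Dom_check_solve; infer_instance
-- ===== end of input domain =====

-- B replaces A's dict-building index loop by one set-cardinality comparison (objective: simpler).

-- ===== PORT A =====
-- the index loop 'for i in range(len(test))' reading test[i]/obtained[i]: after the length
-- guard both lists have the same length, so it is transcribed as parallel structural recursion
def check_solve_go : List Int → List Int → PySem.Dict Int Int → Bool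
  | b :: ts, a :: os, d =>
    match d.get? a with
    | some v => if v ≠ b then false else check_solve_go ts os d
    | none => check_solve_go ts os (d.insert a b)
  | _, _, _ => true

def check_solve (test : List Int) (obtained : List Int) : Bool :=
  if test.length ≠ obtained.length then false
  else check_solve_go test obtained PySem.Dict.empty

-- ===== PORT B =====
def check_solve_alt (test : List Int) (obtained : List Int) : Bool :=
  if test.length ≠ obtained.length then false
  else (PySem.Set.ofList (obtained.zip test)).length == (PySem.Set.ofList obtained).length

-- ===== PRECONDITION & SPEC =====
def Spec_check_solve (test : List Int) (obtained : List Int) (out : Bool) : Prop := out = check_solve_alt test obtained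
instance (test : List Int) (obtained : List Int) (out : Bool) : Decidable (Spec_check_solve test obtained out) := by unfold Spec_check_solve; infer_instance

-- ===== CLAIM (what is proved, stated in full; the proofs are below) =====
def Claim_equal_check_solve : Prop := ∀ (test : List Int) (obtained : List Int), Dom_check_solve test obtained → Spec_check_solve test obtained (check_solve test obtained)

-- ===== LEMMAS AND PROOFS =====

-- the loop invariant: go returns true iff the remaining pairs are consistent with the dict
-- built so far and consistent among themselves
lemma check_solve_go_iff (ts os : List Int) (d : PySem.Dict Int Int) :
    check_solve_go ts os d = true ↔
      ((∀ p ∈ os.zip ts, ∀ v, d.get? p.1 = some v → v = p.2) ∧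
       ∀ p ∈ os.zip ts, ∀ q ∈ os.zip ts, p.1 = q.1 → p.2 = q.2) := by
  induction ts generalizing os d with
  | nil => simp [check_solve_go, List.zip_nil_right]
  | cons b ts ih =>
    cases os with
    | nil => simp [check_solve_go]
    | cons a os =>
      simp only [List.zip_cons_cons, List.mem_cons]
      cases h : d.get? a with
      | some v =>
        by_cases hv : v = b
        · subst hv
          simp only [check_solve_go, h]
          rw [if_neg (by simp), ih]
          constructor
          · rintro ⟨h1, h2⟩
            refine ⟨?_, ?_⟩
            · rintro p (rfl | hp) w hw
              · rw [h] at hw; exact (Option.some_inj.mp hw).symm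
              · exact h1 p hp w hw
            · rintro p (rfl | hp) q (rfl | hq) hk
              · rfl
              · exact h1 q hq v (hk ▸ h)
              · exact (h1 p hp v (hk ▸ h)).symm
              · exact h2 p hp q hq hk
          · rintro ⟨h1, h2⟩
            exact ⟨fun p hp w hw => h1 p (Or.inr hp) w hw,
                   fun p hp q hq hk => h2 p (Or.inr hp) q (Or.inr hq) hk⟩
        · simp only [check_solve_go, h]
          rw [if_pos hv]
          constructor
          · intro hf; exact absurd hf (by simp)
          · rintro ⟨h1, _⟩
            exact absurd (h1 (a, b) (Or.inl rfl) v h) hv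
      | none =>
        simp only [check_solve_go, h]
        rw [ih]
        constructor
        · rintro ⟨h1, h2⟩
          refine ⟨?_, ?_⟩
          · rintro p (rfl | hp) w hw
            · rw [h] at hw; cases hw
            · refine h1 p hp w ?_
              rw [PySem.Dict.get?_insert]
              split
              · rename_i hpa; rw [hpa, h] at hw; cases hw
              · exact hw
          · rintro p (rfl | hp) q (rfl | hq) hk
            · rfl
            · have := h1 q hq
              rw [show q.1 = a from hk.symm, PySem.Dict.get?_insert_self] at this
              exact this b rfl
            · have := h1 p hp
              rw [show p.1 = a from hk, PySem.Dict.get?_insert_self] at this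
              exact (this b rfl).symm
            · exact h2 p hp q hq hk
        · rintro ⟨h1, h2⟩
          refine ⟨?_, fun p hp q hq hk => h2 p (Or.inr hp) q (Or.inr hq) hk⟩
          intro p hp w hw
          rw [PySem.Dict.get?_insert] at hw
          split at hw
          · rename_i hpa
            exact (Option.some_inj.mp hw) ▸ (h2 p (Or.inr hp) (a, b) (Or.inl rfl) hpa).symm ▸ rfl
          · exact h1 p (Or.inr hp) w hw

lemma ofList_length_eq_card {α : Type} [BEq α] [LawfulBEq α] [DecidableEq α] (l : List α) :
    (PySem.Set.ofList l).length = l.toFinset.card := by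
  have hfin : (PySem.Set.ofList l).toFinset = l.toFinset := by
    ext x; simp [PySem.Set.mem_ofList]
  rw [← hfin, List.toFinset_card_of_nodup (PySem.Set.nodup_ofList l)]

lemma alt_iff (test obtained : List Int) (h : test.length = obtained.length) :
    check_solve_alt test obtained = true ↔
      ∀ p ∈ obtained.zip test, ∀ q ∈ obtained.zip test, p.1 = q.1 → p.2 = q.2 := by
  unfold check_solve_alt
  rw [if_neg (by simp [h])]
  have hmap : (obtained.zip test).map Prod.fst = obtained :=
    List.map_fst_zip (le_of_eq h.symm)
  have himg : obtained.toFinset = (obtained.zip test).toFinset.image Prod.fst := by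
    ext x
    simp only [List.mem_toFinset, Finset.mem_image]
    constructor
    · intro hx
      rw [← hmap] at hx
      obtain ⟨p, hp, hpx⟩ := List.mem_map.mp hx
      exact ⟨p, hp, hpx⟩
    · rintro ⟨p, hp, rfl⟩
      rw [← hmap]
      exact List.mem_map.mpr ⟨p, hp, rfl⟩
  rw [beq_iff_eq, ofList_length_eq_card, ofList_length_eq_card, himg, eq_comm,
      Finset.card_image_iff]
  constructor
  · intro hinj p hp q hq hk
    have := hinj (List.mem_toFinset.mpr hp) (List.mem_toFinset.mpr hq) hk
    exact congrArg Prod.snd this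
  · intro hc x hx y hy hk
    have hx' := List.mem_toFinset.mp hx
    have hy' := List.mem_toFinset.mp hy
    exact Prod.ext hk (hc x hx' y hy' hk)

-- ===== VERDICT (by name: the statement is the Claim_ definition above) =====
theorem check_solve_spec : Claim_equal_check_solve := by
  intro test obtained _
  unfold Spec_check_solve
  by_cases h : test.length = obtained.length
  · have hA : check_solve test obtained = true ↔
        ∀ p ∈ obtained.zip test, ∀ q ∈ obtained.zip test, p.1 = q.1 → p.2 = q.2 := by
      unfold check_solve
      rw [if_neg (by simp [h]), check_solve_go_iff]
      simp [PySem.Dict.get?_empty]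
    rw [Bool.eq_iff_iff, hA, alt_iff test obtained h]
  · unfold check_solve check_solve_alt
    rw [if_pos h, if_pos h]
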